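-- pv_equiv track=rewrite | github.com/oZwZo/UTR_VAE | models/extract_ss.py | label_location_for_ptable
-- ===== SOURCE A (Python) =====
-- def label_location_for_ptable(ptv):
--     """
--     for ptable, note its location
--     so that it can
--     """
--     numeric_blocks=[]                  # the new ptable
--     i = 1                              # count
--
--     for block in ptv:     # loop against different block
--         n_local_block=[]
--         for value in block:            # loop within block
--             n_local_block.append((value,i)) # the value together with location
--             i += 1
--         numeric_blocks.append((n_local_block))
--
--     return numeric_blocks if len(numeric_blocks) > 1 else numeric_blocks[0]
-- ===== SOURCE B (Python) =====
-- def label_location_for_ptable(ptv):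
--     # prefix-offset table: starting location index of each block (counter starts at 1)
--     starts = []
--     s = 1
--     for block in ptv:
--         starts.append(s)
--         s += len(block)
--     numeric_blocks = [[(value, k) for k, value in enumerate(block, start)]
--                       for block, start in zip(ptv, starts)]
--     return numeric_blocks if len(numeric_blocks) > 1 else numeric_blocks[0]
-- ===== Notes on version B (the rewrite author's own statement) =====
-- stated objective: alternative
-- what changed: Replaces the single running counter threaded through nested loops by a precomputed prefix-offset table of block start indices, then labels each block independently with enumerate(block, start).
-- outside the precondition, e.g. on label_location_for_ptable([[1, 2]]): A returns [[1, 1], [2, 2]], B returns [[1, 1], [2, 2]]; on label_location_for_ptable([]): A raises IndexError, B raises IndexError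
import Mathlib
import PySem

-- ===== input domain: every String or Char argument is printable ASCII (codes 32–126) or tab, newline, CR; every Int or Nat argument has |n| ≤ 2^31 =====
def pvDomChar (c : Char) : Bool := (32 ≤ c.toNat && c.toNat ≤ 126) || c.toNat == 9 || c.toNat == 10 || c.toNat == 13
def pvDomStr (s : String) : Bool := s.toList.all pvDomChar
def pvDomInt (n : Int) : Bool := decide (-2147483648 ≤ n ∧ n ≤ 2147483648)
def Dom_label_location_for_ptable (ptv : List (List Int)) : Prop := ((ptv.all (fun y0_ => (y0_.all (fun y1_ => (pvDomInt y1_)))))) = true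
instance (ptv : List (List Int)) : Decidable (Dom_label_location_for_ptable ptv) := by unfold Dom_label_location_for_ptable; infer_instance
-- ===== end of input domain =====

-- B computes a prefix-offset table of block start indices and labels each block
-- independently, instead of threading one running counter through nested loops
-- (objective: alternative decomposition, same cost).


-- ===== PORT A =====
-- inner loop: append (value, counter) and bump the counter
def pvInnerA (s : List (Int × Int) × Int) (value : Int) : List (Int × Int) × Int :=
  (s.1 ++ [(value, s.2)], s.2 + 1)
-- outer loop body: label one block from the running counter
def pvStepA (st : List (List (Int × Int)) × Int) (block : List Int) : List (List (Int × Int)) × Int :=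
  let inner := block.foldl pvInnerA ([], st.2)
  (st.1 ++ [inner.1], inner.2)
def label_location_for_ptable (ptv : List (List Int)) : List (List (Int × Int)) :=
  let r := ptv.foldl pvStepA ([], 1)
  -- final guard: on [] Python raises IndexError and on a single block it returns the
  -- bare inner list (a value outside this return type); both are excluded by Pre_,
  -- the port returns [] there.
  if r.1.length > 1 then r.1 else []

-- ===== PORT B =====
-- prefix-offset loop body: record this block's start, advance by its length
def pvStepB (st : List Int × Int) (block : List Int) : List Int × Int :=
  (st.1 ++ [st.2], st.2 + block.length)
def label_location_for_ptable_alt (ptv : List (List Int)) : List (List (Int × Int)) :=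
  let starts := (ptv.foldl pvStepB ([], 1)).1
  let numeric_blocks := (ptv.zip starts).map (fun p =>
      (PySem.List.enumerate p.1 p.2).map (fun kv => (kv.2, kv.1)))
  -- same final guard as A (Python raises / returns the unwrapped list on len ≤ 1; excluded
  -- by Pre_, the port keeps numeric_blocks there)
  if numeric_blocks.length > 1 then numeric_blocks else numeric_blocks

-- ===== PRECONDITION & SPEC =====
-- Pre_ excludes ptv = [] (A raises IndexError) and singleton ptv, where A returns the
-- bare inner list of pairs, a value not of the declared List (List (Int × Int)) type.
def Pre_label_location_for_ptable (ptv : List (List Int)) : Prop := 1 < ptv.length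
instance (ptv : List (List Int)) : Decidable (Pre_label_location_for_ptable ptv) := by unfold Pre_label_location_for_ptable; infer_instance
def pvWitness_label_location_for_ptable : List (List Int) := [[3, 4], [], [5]]
def Spec_label_location_for_ptable (ptv : List (List Int)) (out : List (List (Int × Int))) : Prop := out = label_location_for_ptable_alt ptv
instance (ptv : List (List Int)) (out : List (List (Int × Int))) : Decidable (Spec_label_location_for_ptable ptv out) := by unfold Spec_label_location_for_ptable; infer_instance

-- ===== CLAIM (what is proved, stated in full; the proofs are below) =====
def Claim_equal_label_location_for_ptable : Prop := ∀ (ptv : List (List Int)), Dom_label_location_for_ptable ptv → Pre_label_location_for_ptable ptv → Spec_label_location_for_ptable ptv (label_location_for_ptable ptv)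

-- ===== LEMMAS AND PROOFS =====

-- common reference shape: blocks labelled from counter i
def pvG : List (List Int) → Int → List (List (Int × Int))
  | [], _ => []
  | b :: bs, i => ((PySem.List.enumerate b i).map (fun kv => (kv.2, kv.1))) :: pvG bs (i + b.length)

-- reference start-index list
def pvStarts : List (List Int) → Int → List Int
  | [], _ => []
  | b :: bs, i => i :: pvStarts bs (i + b.length)

theorem pvG_length (ptv : List (List Int)) (i : Int) : (pvG ptv i).length = ptv.length := by
  induction ptv generalizing i with
  | nil => rfl
  | cons b bs ih => simp [pvG, ih]

theorem pv_inner (b : List Int) (acc : List (Int × Int)) (i : Int) :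
    b.foldl pvInnerA (acc, i)
      = (acc ++ (PySem.List.enumerate b i).map (fun kv => (kv.2, kv.1)), i + b.length) := by
  induction b generalizing acc i with
  | nil => simp
  | cons v vs ih =>
      simp only [List.foldl_cons, pvInnerA, ih, PySem.List.enumerate_cons, List.map_cons,
        Prod.mk.injEq]
      refine ⟨by simp, by push_cast [List.length_cons]; ring⟩

theorem pvStepA_eq (st : List (List (Int × Int)) × Int) (block : List Int) :
    pvStepA st block
      = (st.1 ++ [(PySem.List.enumerate block st.2).map (fun kv => (kv.2, kv.1))],
         st.2 + block.length) := by
  simp [pvStepA, pv_inner]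

theorem pv_outerA (ptv : List (List Int)) (acc : List (List (Int × Int))) (i : Int) :
    ptv.foldl pvStepA (acc, i)
      = (acc ++ pvG ptv i, i + (ptv.map List.length).sum) := by
  induction ptv generalizing acc i with
  | nil => simp [pvG]
  | cons b bs ih =>
      rw [List.foldl_cons, pvStepA_eq, ih]
      simp only [pvG, Prod.mk.injEq]
      refine ⟨by simp, by simp only [List.map_cons, List.sum_cons]; push_cast; ring⟩

theorem pv_starts (ptv : List (List Int)) (acc : List Int) (i : Int) :
    ptv.foldl pvStepB (acc, i)
      = (acc ++ pvStarts ptv i, i + (ptv.map List.length).sum) := by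
  induction ptv generalizing acc i with
  | nil => simp [pvStarts]
  | cons b bs ih =>
      rw [List.foldl_cons]
      simp only [pvStepB, ih, pvStarts, Prod.mk.injEq]
      refine ⟨by simp, by simp only [List.map_cons, List.sum_cons]; push_cast; ring⟩

theorem pv_zip_starts (ptv : List (List Int)) (i : Int) :
    (ptv.zip (pvStarts ptv i)).map (fun p =>
        (PySem.List.enumerate p.1 p.2).map (fun kv => (kv.2, kv.1)))
      = pvG ptv i := by
  induction ptv generalizing i with
  | nil => rfl
  | cons b bs ih => simp [pvStarts, pvG, ih]

-- ===== VERDICT (by name: the statement is the Claim_ definition above) =====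
theorem label_location_for_ptable_spec : Claim_equal_label_location_for_ptable := by
  intro ptv _ hpre
  unfold Spec_label_location_for_ptable label_location_for_ptable label_location_for_ptable_alt
  have h : 1 < ptv.length := hpre
  simp only [pv_outerA, pv_starts, List.nil_append, pv_zip_starts, pvG_length, if_pos h]
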